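-- pv_equiv track=rewrite | github.com/timfogarty1549/musmemSkills | musmem-toc/python/extract_toc.py | _collapse_char_spaces
-- ===== SOURCE A (Python) =====
-- def _collapse_char_spaces(text):
--     """
--     Merge runs of space-separated single alphabetic characters into words.
--     e.g. "H o w G o o d" → "HowGood"  (best-effort for character-spaced OCR)
--     Multi-char tokens break the run; punctuation and digits are left as-is.
--     """
--     tokens = text.split(' ')
--     result = []
--     i = 0
--     while i < len(tokens):
--         tok = tokens[i]
--         if len(tok) == 1 and tok.isalpha():
--             run = tok
--             i += 1
--             while i < len(tokens) and len(tokens[i]) == 1 and tokens[i].isalpha():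
--                 run += tokens[i]
--                 i += 1
--             result.append(run)
--         else:
--             result.append(tok)
--             i += 1
--     return ' '.join(result)
-- ===== SOURCE B (Python) =====
-- def _collapse_char_spaces(text):
--     """Character-level rewrite: a space is deleted exactly when it separates two
--     single-letter tokens (letter bounded by spaces/string ends on both sides);
--     every other character is copied through.  No tokenization at all."""
--     out = []
--     p2 = p1 = None
--     n = len(text)
--     for j, c in enumerate(text):
--         if (c == ' '
--                 and p1 is not None and p1.isalpha()
--                 and (p2 is None or p2 == ' ')
--                 and j + 1 < n and text[j + 1].isalpha()
--                 and (j + 2 == n or text[j + 2] == ' ')):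
--             pass  # drop this space: it joins two single-letter tokens
--         else:
--             out.append(c)
--         p2, p1 = p1, c
--     return ''.join(out)
-- ===== Notes on version B (the rewrite author's own statement) =====
-- stated objective: alternative
-- what changed: Replaces A's tokenize/merge-runs/rejoin pipeline (split on ' ', nested while-loops gluing runs of single-letter tokens, ' '.join) by a character-level filter: one scan over the raw string that deletes exactly the spaces flanked on both sides by a single-letter token, copying every other character through; no token lists are ever built.
import Mathlib
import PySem

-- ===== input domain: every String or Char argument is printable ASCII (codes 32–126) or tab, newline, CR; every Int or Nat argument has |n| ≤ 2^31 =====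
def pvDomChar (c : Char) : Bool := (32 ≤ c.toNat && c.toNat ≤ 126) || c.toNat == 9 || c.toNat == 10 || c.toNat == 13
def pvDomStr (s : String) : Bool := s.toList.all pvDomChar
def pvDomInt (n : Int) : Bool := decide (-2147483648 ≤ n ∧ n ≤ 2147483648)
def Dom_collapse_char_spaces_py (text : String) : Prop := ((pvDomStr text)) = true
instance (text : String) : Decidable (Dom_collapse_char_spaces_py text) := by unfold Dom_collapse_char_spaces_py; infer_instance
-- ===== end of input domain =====

-- B abandons tokenization entirely: it copies the string character by character, deleting exactly
-- those spaces that separate two single-letter tokens; objective: alternative (same cost, no split/join).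

-- shared token predicate: len(tok) == 1 and tok.isalpha()
def pvGood (t : String) : Bool := PySem.Str.len t == 1 && PySem.Str.strIsalpha t

-- ===== PORT A =====
-- inner while loop of A: greedily extend the run
def pvRunA (run : String) : List String → String × List String
  | [] => (run, [])
  | t :: ts => if pvGood t then pvRunA (run ++ t) ts else (run, t :: ts)

-- termination measure for the outer loop (cited by pvLoopA's decreasing_by)
theorem pvRunA_len (run : String) (ts : List String) :
    (pvRunA run ts).2.length ≤ ts.length := by
  induction ts generalizing run with
  | nil => simp [pvRunA]
  | cons t ts ih =>
    simp only [pvRunA]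
    split
    · exact le_trans (ih _) (Nat.le_succ _)
    · simp

-- outer while loop of A
def pvLoopA : List String → List String
  | [] => []
  | t :: ts =>
    if pvGood t then
      (pvRunA t ts).1 :: pvLoopA (pvRunA t ts).2
    else
      t :: pvLoopA ts
termination_by ts => ts.length
decreasing_by
  all_goals simp_wf
  have := pvRunA_len t ts; omega

def collapse_char_spaces_py (text : String) : String :=
  -- text.split(' '): sep is non-empty, so split? always returns some
  let tokens := (PySem.Str.split? text " ").getD []
  PySem.Str.join " " (pvLoopA tokens)

-- ===== PORT B =====
-- left half of Source B's condition: p1 is a letter and p2 is a space / the string start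
def pvLeftOK (p2 p1 : Option Char) : Bool :=
  (match p1 with | some a => PySem.Chars.isalpha a | none => false) &&
  (match p2 with | some b => b == ' ' | none => true)

-- right half of Source B's condition: the next char is a letter followed by a space / the string end
def pvRightOK (rest : List Char) : Bool :=
  match rest with
  | [] => false
  | d :: rest2 => PySem.Chars.isalpha d &&
      (match rest2 with | [] => true | e :: _ => e == ' ')

-- Source B's loop: per-character scan carrying the two previous chars (p2, p1); the lookahead
-- text[j+1], text[j+2] is read off the remaining suffix
def pvGoB (p2 p1 : Option Char) : List Char → List Char
  | [] => []
  | c :: rest =>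
    if c == ' ' && pvLeftOK p2 p1 && pvRightOK rest then
      pvGoB p1 (some c) rest
    else
      c :: pvGoB p1 (some c) rest

def collapse_char_spaces_py_alt (text : String) : String :=
  String.ofList (pvGoB none none text.toList)

-- ===== PRECONDITION & SPEC =====
def Spec_collapse_char_spaces_py (text : String) (out : String) : Prop := out = collapse_char_spaces_py_alt text
instance (text : String) (out : String) : Decidable (Spec_collapse_char_spaces_py text out) := by unfold Spec_collapse_char_spaces_py; infer_instance

-- ===== CLAIM (what is proved, stated in full; the proofs are below) =====
def Claim_equal_collapse_char_spaces_py : Prop := ∀ (text : String), Dom_collapse_char_spaces_py text → Spec_collapse_char_spaces_py text (collapse_char_spaces_py text)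

-- ===== LEMMAS AND PROOFS =====

-- char-level form of pvGood
def pvCharGood (w : List Char) : Bool := (w.length == 1) && w.all PySem.Chars.isalpha

theorem pvGood_eq (t : String) : pvGood t = pvCharGood t.toList := by
  simp only [pvGood, pvCharGood, PySem.Str.strIsalpha_eq, PySem.Chars.strIsalpha,
    PySem.Str.len_eq]
  cases h : t.toList with
  | nil => simp
  | cons c w =>
    cases w
    · simp
    · simp; omega

-- join with ' ' of a token list, char level
def pvJoinT : List String → List Char
  | [] => []
  | [t] => t.toList
  | t :: u :: us => t.toList ++ ' ' :: pvJoinT (u :: us)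

theorem pvJoinT_cons (x : String) (L : List String) :
    pvJoinT (x :: L) = x.toList ++ (if L.isEmpty then [] else ' ' :: pvJoinT L) := by
  cases L <;> simp [pvJoinT]

-- context update of Source B's loop: (p2, p1) after scanning w
def pvCtx (p2 p1 : Option Char) (w : List Char) : Option Char × Option Char :=
  w.foldl (fun q c => (q.2, some c)) (p2, p1)

-- non-space characters pass through pvGoB unchanged
theorem pvGoB_pass (w : List Char) (hw : ' ' ∉ w) (p2 p1 : Option Char) (rest : List Char) :
    pvGoB p2 p1 (w ++ rest) =
      w ++ pvGoB (pvCtx p2 p1 w).1 (pvCtx p2 p1 w).2 rest := by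
  induction w generalizing p2 p1 with
  | nil => simp [pvCtx]
  | cons c w ih =>
    have hc : c ≠ ' ' := by intro h; exact hw (h ▸ List.mem_cons_self)
    have hw' : ' ' ∉ w := fun h => hw (List.mem_cons_of_mem _ h)
    simp only [List.cons_append, pvGoB, beq_iff_eq, hc,
      Bool.and_eq_true, false_and]
    rw [ih hw']
    rfl

-- the left half of the drop test recognises exactly a good previous token
theorem pvSpaceNotAlpha : PySem.Chars.isalpha ' ' = false := by decide

theorem pvLeftOK_ctx (p2 p1 : Option Char) (hp : p1 = none ∨ p1 = some ' ')
    (w : List Char) (hw : ' ' ∉ w) :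
    pvLeftOK (pvCtx p2 p1 w).1 (pvCtx p2 p1 w).2 = pvCharGood w := by
  rcases w.eq_nil_or_concat with h | ⟨ys, a, rfl⟩
  · subst h
    rcases hp with rfl | rfl <;> simp [pvCtx, pvLeftOK, pvCharGood, pvSpaceNotAlpha]
  · rcases ys.eq_nil_or_concat with h | ⟨zs, b, rfl⟩
    · subst h
      rcases hp with rfl | rfl <;>
        simp [pvCtx, pvLeftOK, pvCharGood, List.concat_eq_append]
    · have hb : b ≠ ' ' := by
        intro h; exact hw (by simp [List.concat_eq_append, h])
      have hctx : pvCtx p2 p1 ((zs.concat b).concat a) = (some b, some a) := by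
        simp [pvCtx, List.concat_eq_append, List.foldl_append]
      rw [hctx]
      simp [pvLeftOK, pvCharGood, hb, List.concat_eq_append]

-- the right half of the drop test recognises exactly a good next token
theorem pvRightOK_join (u : String) (us : List String) (hu : ' ' ∉ u.toList) :
    pvRightOK (pvJoinT (u :: us)) = pvCharGood u.toList := by
  cases hw : u.toList with
  | nil =>
    cases us with
    | nil => simp [pvJoinT, hw, pvRightOK, pvCharGood]
    | cons v vs => simp [pvJoinT, hw, pvRightOK, pvCharGood, pvSpaceNotAlpha]
  | cons d w =>
    cases w with
    | nil =>
      cases us with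
      | nil => simp [pvJoinT, hw, pvRightOK, pvCharGood]
      | cons v vs => simp [pvJoinT, hw, pvRightOK, pvCharGood]
    | cons e w2 =>
      have he : e ≠ ' ' := by
        intro h; exact hu (by rw [hw, h]; exact List.mem_cons_of_mem _ List.mem_cons_self)
      cases us with
      | nil => simp [pvJoinT, hw, pvRightOK, pvCharGood, he]
      | cons v vs => simp [pvJoinT, hw, pvRightOK, pvCharGood, he]

-- the run accumulator of A only ever appends
theorem pvRunA_shift (ts : List String) (a b : String) :
    pvRunA (a ++ b) ts = (a ++ (pvRunA b ts).1, (pvRunA b ts).2) := by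
  induction ts generalizing b with
  | nil => simp [pvRunA]
  | cons t ts ih =>
    simp only [pvRunA]
    split
    · rw [String.append_assoc, ih]
    · simp

theorem pvLoopA_ne_nil (t : String) (ts : List String) : pvLoopA (t :: ts) ≠ [] := by
  rw [pvLoopA]; split <;> simp

-- A merges two adjacent good tokens: the run just grows by t
theorem pvLoopA_glue (t u : String) (us : List String)
    (hgt : pvGood t = true) (hgu : pvGood u = true) :
    pvJoinT (pvLoopA (t :: u :: us)) = t.toList ++ pvJoinT (pvLoopA (u :: us)) := by
  have h1 : pvRunA t (u :: us) = (t ++ (pvRunA u us).1, (pvRunA u us).2) := by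
    rw [pvRunA, if_pos hgu]; exact pvRunA_shift us t u
  rw [pvLoopA, if_pos hgt, h1]
  conv_rhs => rw [pvLoopA, if_pos hgu]
  rw [pvJoinT_cons, pvJoinT_cons]
  simp

-- A keeps the boundary when the two adjacent tokens are not both good
theorem pvLoopA_keep (t u : String) (us : List String)
    (h : ¬(pvGood t = true ∧ pvGood u = true)) :
    pvLoopA (t :: u :: us) = t :: pvLoopA (u :: us) := by
  by_cases hgt : pvGood t = true
  · have hgu : ¬ pvGood u = true := fun hu => h ⟨hgt, hu⟩
    rw [pvLoopA, if_pos hgt, pvRunA, if_neg hgu]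
  · rw [pvLoopA, if_neg hgt]

-- main lemma: B's char scan over the joined tokens equals the join of A's merged tokens
theorem pvMain (ts : List String) (hts : ∀ t ∈ ts, ' ' ∉ t.toList)
    (p2 p1 : Option Char) (hp : p1 = none ∨ p1 = some ' ') :
    pvGoB p2 p1 (pvJoinT ts) = pvJoinT (pvLoopA ts) := by
  induction ts generalizing p2 p1 with
  | nil => simp [pvJoinT, pvLoopA, pvGoB]
  | cons t rest ih =>
    have ht : ' ' ∉ t.toList := hts t List.mem_cons_self
    cases rest with
    | nil =>
      rw [show pvJoinT [t] = t.toList ++ [] by simp [pvJoinT],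
        pvGoB_pass t.toList ht p2 p1 []]
      simp [pvGoB, pvLoopA, pvRunA, pvJoinT]
    | cons u us =>
      have hu : ' ' ∉ u.toList := hts u (List.mem_cons_of_mem _ List.mem_cons_self)
      have hrest : ∀ v ∈ u :: us, ' ' ∉ v.toList :=
        fun v hv => hts v (List.mem_cons_of_mem _ hv)
      have hJ : pvJoinT (t :: u :: us) = t.toList ++ ' ' :: pvJoinT (u :: us) := rfl
      rw [hJ, pvGoB_pass t.toList ht p2 p1 (' ' :: pvJoinT (u :: us))]
      have hL := pvLeftOK_ctx p2 p1 hp t.toList ht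
      have hR := pvRightOK_join u us hu
      have hIH := ih hrest (pvCtx p2 p1 t.toList).2 (some ' ') (Or.inr rfl)
      rw [pvGoB]
      by_cases hg : pvCharGood t.toList = true ∧ pvCharGood u.toList = true
      · rw [if_pos (by simp [hL, hR, hg.1, hg.2]), hIH,
          pvLoopA_glue t u us (by rw [pvGood_eq]; exact hg.1) (by rw [pvGood_eq]; exact hg.2)]
      · rw [if_neg (by
          simp only [hL, hR, Bool.and_eq_true, beq_iff_eq]
          intro hcontra
          exact hg ⟨hcontra.1.2, hcontra.2⟩), hIH,
          pvLoopA_keep t u us (by rw [pvGood_eq, pvGood_eq]; exact hg)]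
        rw [pvJoinT_cons]
        simp [pvLoopA_ne_nil u us]

-- split(' ') facts, via a simple structural recursion equal to PySem's fuel-based splitter
def pvSp1 : List Char → List Char × List (List Char)
  | [] => ([], [])
  | c :: rest =>
    if c = ' ' then ([], (pvSp1 rest).1 :: (pvSp1 rest).2)
    else (c :: (pvSp1 rest).1, (pvSp1 rest).2)

theorem pvSplitOn_go_spec (fuel : Nat) (l cur : List Char) (acc : List (List Char))
    (h : l.length < fuel + 1) :
    PySem.Chars.splitOn.go [' '] fuel l cur acc =
      acc.reverse ++ (cur.reverse ++ (pvSp1 l).1) :: (pvSp1 l).2 := by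
  induction fuel generalizing l cur acc with
  | zero =>
    have : l = [] := by cases l <;> simp_all
    subst this
    simp [PySem.Chars.splitOn.go, pvSp1]
  | succ f ihf =>
    cases l with
    | nil => simp [PySem.Chars.splitOn.go, pvSp1]
    | cons c rest =>
      rw [PySem.Chars.splitOn.go]
      by_cases hc : c = ' '
      · subst hc
        rw [if_pos (by simp [List.isPrefixOf])]
        rw [ihf _ _ _ (by simpa using Nat.lt_succ_iff.mp (by simpa using h))]
        simp [pvSp1]
      · rw [if_neg (by simp [List.isPrefixOf]; intro h'; exact hc h'.symm)]
        rw [ihf _ _ _ (by simp at h ⊢; omega)]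
        simp [pvSp1, hc]

theorem pvSplitOn_eq (cs : List Char) :
    PySem.Chars.splitOn cs [' '] = (pvSp1 cs).1 :: (pvSp1 cs).2 := by
  rw [PySem.Chars.splitOn, pvSplitOn_go_spec _ _ _ _ (by omega)]
  simp

-- pvJoinT is intercalation with a single space
theorem pvJoinT_eq (ts : List String) :
    pvJoinT ts = List.intercalate [' '] (ts.map String.toList) := by
  induction ts with
  | nil => simp [pvJoinT, List.intercalate]
  | cons t rest ih =>
    cases rest with
    | nil => simp [pvJoinT, List.intercalate]
    | cons u us =>
      rw [show pvJoinT (t :: u :: us) = t.toList ++ ' ' :: pvJoinT (u :: us) from rfl, ih]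
      simp [List.intercalate]

theorem pvSp1_join (cs : List Char) :
    List.intercalate [' '] ((pvSp1 cs).1 :: (pvSp1 cs).2) = cs := by
  induction cs with
  | nil => simp [pvSp1, List.intercalate]
  | cons c rest ih =>
    by_cases hc : c = ' '
    · subst hc
      simp only [pvSp1, if_pos]
      simp [List.intercalate] at ih ⊢
      cases h2 : (pvSp1 rest).2 <;> simp_all
    · simp only [pvSp1, if_neg hc]
      cases h2 : (pvSp1 rest).2 <;> simp_all [List.intercalate]

theorem pvSp1_no_space (cs : List Char) :
    ∀ w ∈ (pvSp1 cs).1 :: (pvSp1 cs).2, ' ' ∉ w := by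
  induction cs with
  | nil => simp [pvSp1]
  | cons c rest ih =>
    by_cases hc : c = ' '
    · subst hc
      have hstep : pvSp1 (' ' :: rest) = ([], (pvSp1 rest).1 :: (pvSp1 rest).2) := by
        simp [pvSp1]
      rw [hstep]
      intro w hw
      rcases List.mem_cons.mp hw with rfl | hw
      · simp
      · exact ih w hw
    · have hstep : pvSp1 (c :: rest) = (c :: (pvSp1 rest).1, (pvSp1 rest).2) := by
        simp [pvSp1, hc]
      rw [hstep]
      intro w hw
      rcases List.mem_cons.mp hw with rfl | hw
      · intro hmem
        rcases List.mem_cons.mp hmem with h | h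
        · exact hc h.symm
        · exact ih _ List.mem_cons_self h
      · exact ih w (List.mem_cons_of_mem _ hw)

-- ===== VERDICT (by name: the statement is the Claim_ definition above) =====
theorem collapse_char_spaces_py_spec : Claim_equal_collapse_char_spaces_py := by
  intro text _
  unfold Spec_collapse_char_spaces_py collapse_char_spaces_py collapse_char_spaces_py_alt
  -- obtain the token list and its char-level image
  have hsm := PySem.Str.split?_map text " "
  have hsep : (" " : String).toList = [' '] := by decide
  rw [hsep] at hsm
  rw [show PySem.Chars.split? text.toList [' ']
        = some (PySem.Chars.splitOn text.toList [' ']) from by simp [PySem.Chars.split?],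
    pvSplitOn_eq] at hsm
  rcases Option.map_eq_some_iff.mp hsm with ⟨ts, hts, hmap⟩
  rw [hts]
  simp only [Option.getD_some]
  -- facts about the tokens
  have hnosp : ∀ t ∈ ts, ' ' ∉ t.toList := by
    intro t htm
    exact pvSp1_no_space text.toList t.toList
      (hmap ▸ List.mem_map_of_mem htm)
  have htext : text.toList = pvJoinT ts := by
    rw [pvJoinT_eq, hmap, pvSp1_join]
  -- both results, at the char level
  have hA : (PySem.Str.join " " (pvLoopA ts)).toList = pvJoinT (pvLoopA ts) := by
    rw [PySem.Str.toList_join, hsep, PySem.Chars.join, pvJoinT_eq]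
  have hB : pvGoB none none text.toList = pvJoinT (pvLoopA ts) := by
    rw [htext]
    exact pvMain ts hnosp none none (Or.inl rfl)
  calc PySem.Str.join " " (pvLoopA ts)
      = String.ofList (PySem.Str.join " " (pvLoopA ts)).toList := String.ofList_toList.symm
    _ = String.ofList (pvGoB none none text.toList) := by rw [hA, hB]
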